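-- pv_equiv track=rewrite | github.com/biopinda/coletores-BO | src/validar_canonicalizacao.py | _detectar_sobrenomes_inconsistentes
-- ===== SOURCE A (Python) =====
-- from typing import Dict, List, Tuple, Optional, Any
--
-- def _detectar_sobrenomes_inconsistentes(coletor: Dict) -> bool:
--     """
--     Detecta se um coletor tem sobrenomes inconsistentes nas variações
--     """
--     sobrenomes = []
--
--     for variacao in coletor['variacoes']:
--         # Extrai possível sobrenome da variação
--         forma = variacao['forma_original']
--
--         # Diferentes padrões para extrair sobrenome
--         if ',' in forma:
--             sobrenome = forma.split(',')[0].strip()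
--         else:
--             partes = forma.split()
--             if partes:
--                 sobrenome = partes[-1]  # Última palavra como sobrenome
--             else:
--                 continue
--
--         sobrenomes.append(sobrenome.lower())
--
--     # Verifica se há sobrenomes muito diferentes
--     if len(set(sobrenomes)) > 1:
--         # Usa uma heurística simples: se a primeira letra é diferente, pode ser inconsistente
--         primeiras_letras = set(s[0] for s in sobrenomes if s)
--         if len(primeiras_letras) > 1:
--             return True
--
--     return False
-- ===== SOURCE B (Python) =====
-- def _detectar_sobrenomes_inconsistentes(coletor):
--     """Early-exit scan: remember only the initial of the first surname seen
--     and return True at the first variation whose surname starts differently.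
--     No intermediate list or set is built; the scan short-circuits."""
--     first = None
--     for variacao in coletor['variacoes']:
--         forma = variacao['forma_original']
--         if ',' in forma:
--             sobrenome = forma.split(',')[0].strip()
--         else:
--             partes = forma.split()
--             if not partes:
--                 continue
--             sobrenome = partes[-1]
--         s = sobrenome.lower()
--         if not s:
--             continue
--         c = s[0]
--         if first is None:
--             first = c
--         elif c != first:
--             return True
--     return False
-- ===== Notes on version B (the rewrite author's own statement) =====
-- stated objective: alternative
-- what changed: B replaces A's staged list-plus-two-sets computation with an early-exit scan that keeps only the initial of the first surname seen and returns True at the first mismatching initial, building no collections at all (A's outer distinct-surname check is implied).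
import Mathlib
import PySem

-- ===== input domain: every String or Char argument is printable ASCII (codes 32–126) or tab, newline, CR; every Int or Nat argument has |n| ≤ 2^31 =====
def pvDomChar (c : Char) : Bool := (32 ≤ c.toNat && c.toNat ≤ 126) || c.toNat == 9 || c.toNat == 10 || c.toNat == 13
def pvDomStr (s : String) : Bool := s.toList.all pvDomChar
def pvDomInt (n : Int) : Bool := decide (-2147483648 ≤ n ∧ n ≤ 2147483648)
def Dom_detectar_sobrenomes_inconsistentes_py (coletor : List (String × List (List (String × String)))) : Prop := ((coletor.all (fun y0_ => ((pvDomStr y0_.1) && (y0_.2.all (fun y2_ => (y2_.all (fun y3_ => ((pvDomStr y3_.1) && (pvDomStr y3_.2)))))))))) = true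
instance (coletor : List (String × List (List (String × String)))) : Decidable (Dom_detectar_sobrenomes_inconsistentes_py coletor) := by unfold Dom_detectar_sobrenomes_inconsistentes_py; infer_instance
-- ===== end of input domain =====

-- B replaces A's list-plus-two-sets staging with an early-exit scan that keeps only the
-- initial of the first surname seen and returns True at the first mismatching initial.
-- ===== PORT A =====
def detectar_sobrenomes_inconsistentes_py (coletor : List (String × List (List (String × String)))) : Bool :=
  -- sobrenomes = [] ; for variacao in coletor['variacoes']: …
  let sobrenomes : List String :=
    ((coletor.lookup "variacoes").getD []).foldl (fun acc variacao =>
      let forma := (variacao.lookup "forma_original").getD ""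
      if PySem.Str.isIn "," forma then
        acc ++ [PySem.Str.lower (PySem.Str.strip (((PySem.Str.split? forma ",").getD []).headD ""))]
      else
        match (PySem.Str.split₀ forma).getLast? with
        | some w => acc ++ [PySem.Str.lower w]
        | none => acc) []
  if PySem.Set.len (PySem.Set.ofList sobrenomes) > 1 then
    -- primeiras_letras = set(s[0] for s in sobrenomes if s)  (a 1-char Python string ↦ Char)
    let primeiras_letras : PySem.Set Char :=
      PySem.Set.ofList (sobrenomes.filterMap (fun s => s.toList.head?))
    if PySem.Set.len primeiras_letras > 1 then true else false
  else false

-- ===== PORT B =====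
-- the surname Source B extracts from one variação (none = 'continue' on empty forma)
def pvSobrenome? (variacao : List (String × String)) : Option String :=
  let forma := (variacao.lookup "forma_original").getD ""
  if PySem.Str.isIn "," forma then
    some (PySem.Str.strip (((PySem.Str.split? forma ",").getD []).headD ""))
  else
    (PySem.Str.split₀ forma).getLast?

-- the for-loop of Source B with its two early exits: recursion over the variações,
-- carrying `first : Option Char` (None = no surname initial seen yet);
-- returning `true` inside the loop is the Python `return True`.
def pvAltLoop : List (List (String × String)) → Option Char → Bool
  | [], _ => false
  | variacao :: vs, first =>
    match pvSobrenome? variacao with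
    | none => pvAltLoop vs first            -- continue (empty forma)
    | some sob =>
      match (PySem.Str.lower sob).toList.head? with
      | none => pvAltLoop vs first          -- continue (empty surname)
      | some c =>
        match first with
        | none => pvAltLoop vs (some c)     -- first = c
        | some f => if c ≠ f then true else pvAltLoop vs (some f)

def detectar_sobrenomes_inconsistentes_py_alt (coletor : List (String × List (List (String × String)))) : Bool :=
  pvAltLoop ((coletor.lookup "variacoes").getD []) none

-- ===== PRECONDITION & SPEC =====
-- Pre_ excludes exactly the inputs where Python A raises KeyError: a missing 'variacoes'
-- key, or a variação without a 'forma_original' key.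
def Pre_detectar_sobrenomes_inconsistentes_py (coletor : List (String × List (List (String × String)))) : Prop :=
  (coletor.lookup "variacoes").isSome = true ∧
  ∀ v ∈ (coletor.lookup "variacoes").getD [], (v.lookup "forma_original").isSome = true
instance (coletor : List (String × List (List (String × String)))) : Decidable (Pre_detectar_sobrenomes_inconsistentes_py coletor) := by unfold Pre_detectar_sobrenomes_inconsistentes_py; infer_instance

def pvWitness_detectar_sobrenomes_inconsistentes_py : (List (String × List (List (String × String)))) :=
  [("variacoes", [[("forma_original", "Silva, J.")], [("forma_original", "J. Souza")]])]

def Spec_detectar_sobrenomes_inconsistentes_py (coletor : List (String × List (List (String × String)))) (out : Bool) : Prop := out = detectar_sobrenomes_inconsistentes_py_alt coletor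
instance (coletor : List (String × List (List (String × String)))) (out : Bool) : Decidable (Spec_detectar_sobrenomes_inconsistentes_py coletor out) := by unfold Spec_detectar_sobrenomes_inconsistentes_py; infer_instance

-- ===== CLAIM (what is proved, stated in full; the proofs are below) =====
def Claim_equal_detectar_sobrenomes_inconsistentes_py : Prop := ∀ (coletor : List (String × List (List (String × String)))), Dom_detectar_sobrenomes_inconsistentes_py coletor → Pre_detectar_sobrenomes_inconsistentes_py coletor → Spec_detectar_sobrenomes_inconsistentes_py coletor (detectar_sobrenomes_inconsistentes_py coletor)

-- ===== LEMMAS AND PROOFS =====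

-- the lowered surname A appends for one variação (none = 'continue')
def pvSurLow (variacao : List (String × String)) : Option String :=
  (pvSobrenome? variacao).map PySem.Str.lower

-- the initial this variação contributes (none = contributes nothing)
def pvLetterOf (variacao : List (String × String)) : Option Char :=
  (pvSobrenome? variacao).bind (fun sob => (PySem.Str.lower sob).toList.head?)

theorem pvLetterOf_eq (v : List (String × String)) :
    pvLetterOf v = (pvSurLow v).bind (fun s => s.toList.head?) := by
  unfold pvLetterOf pvSurLow
  cases pvSobrenome? v <;> simp

-- B's loop on the abstract stream of initials
def pvScan : List Char → Option Char → Bool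
  | [], _ => false
  | c :: cs, none => pvScan cs (some c)
  | c :: cs, some f => if c ≠ f then true else pvScan cs (some f)

theorem pvFoldlApp {α β : Type} (f : α → Option β) (vs : List α) (acc : List β) :
    vs.foldl (fun acc v => (f v).elim acc (fun s => acc ++ [s])) acc
      = acc ++ vs.filterMap f := by
  induction vs generalizing acc with
  | nil => simp
  | cons v vs ih => cases h : f v <;> simp [h, ih]

theorem pvA_step :
    (fun (acc : List String) (variacao : List (String × String)) =>
      let forma := (variacao.lookup "forma_original").getD ""
      if PySem.Str.isIn "," forma then
        acc ++ [PySem.Str.lower (PySem.Str.strip (((PySem.Str.split? forma ",").getD []).headD ""))]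
      else
        match (PySem.Str.split₀ forma).getLast? with
        | some w => acc ++ [PySem.Str.lower w]
        | none => acc)
    = (fun acc variacao => (pvSurLow variacao).elim acc (fun s => acc ++ [s])) := by
  funext acc v
  unfold pvSurLow pvSobrenome?
  by_cases h : PySem.Chars.isIn [','] ((v.lookup "forma_original").getD "" : String).toList = true
  · simp [h]
  · cases hg : ((PySem.Str.split₀ ((v.lookup "forma_original").getD "")).getLast?) <;> simp [h, hg]

-- pvAltLoop is pvScan on the stream of initials
theorem pvAlt_eq_scan (vs : List (List (String × String))) (first : Option Char) :
    pvAltLoop vs first = pvScan (vs.filterMap pvLetterOf) first := by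
  induction vs generalizing first with
  | nil => rfl
  | cons v vs ih =>
    unfold pvAltLoop
    rw [List.filterMap_cons]
    cases hs : pvSobrenome? v with
    | none => simp [pvLetterOf, hs, ih]
    | some sob =>
      cases hh : (PySem.Chars.lower sob.toList).head? with
      | none => simp [pvLetterOf, hs, hh, ih]
      | some c =>
        cases first with
        | none => simp [pvLetterOf, hs, hh, pvScan, ih]
        | some f => by_cases hcf : c = f <;> simp [pvLetterOf, hs, hh, pvScan, hcf, ih]

theorem pvScan_some (cs : List Char) (f : Char) :
    pvScan cs (some f) = !decide (∀ c ∈ cs, c = f) := by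
  induction cs with
  | nil => simp [pvScan]
  | cons c cs ih =>
    rw [pvScan]
    by_cases h : c = f
    · simp [h, ih]
    · simp [h]

theorem pvScan_none (cs : List Char) :
    pvScan cs none = !decide (∀ a ∈ cs, ∀ b ∈ cs, a = b) := by
  cases cs with
  | nil => simp [pvScan]
  | cons c cs =>
    have h1 : pvScan (c :: cs) none = pvScan cs (some c) := rfl
    rw [h1, pvScan_some]
    have h2 : (∀ d ∈ cs, d = c) ↔ (∀ a ∈ c :: cs, ∀ b ∈ c :: cs, a = b) := by
      constructor
      · intro h a ha b hb
        rcases List.mem_cons.mp ha with rfl | ha'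
        · rcases List.mem_cons.mp hb with rfl | hb'
          · rfl
          · exact (h b hb').symm
        · rcases List.mem_cons.mp hb with rfl | hb'
          · exact h a ha'
          · rw [h a ha', h b hb']
      · intro h d hd
        exact h d (by simp [hd]) c (by simp)
    simp only [h2]

-- a set built from a list has ≤ 1 element iff all list elements are equal
theorem pvSetLenLeOne {α : Type} [BEq α] [LawfulBEq α] (xs : List α) :
    (PySem.Set.ofList xs).length ≤ 1 ↔ ∀ a ∈ xs, ∀ b ∈ xs, a = b := by
  constructor
  · intro h a ha b hb
    rw [← PySem.Set.mem_ofList] at ha hb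
    match hs : PySem.Set.ofList xs with
    | [] => rw [hs] at ha; cases ha
    | [c] => rw [hs] at ha hb; simp at ha hb; rw [ha, hb]
    | c :: d :: t => rw [hs] at h; simp at h
  · intro h
    match hs : PySem.Set.ofList xs with
    | [] => simp
    | [c] => simp
    | c :: d :: t =>
      exfalso
      have hc : c ∈ PySem.Set.ofList xs := by rw [hs]; simp
      have hd : d ∈ PySem.Set.ofList xs := by rw [hs]; simp
      rw [PySem.Set.mem_ofList] at hc hd
      have := h c hc d hd
      have hn := PySem.Set.nodup_ofList xs
      rw [hs] at hn
      simp [this] at hn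

theorem detectar_equal (coletor : List (String × List (List (String × String)))) :
    detectar_sobrenomes_inconsistentes_py coletor = detectar_sobrenomes_inconsistentes_py_alt coletor := by
  unfold detectar_sobrenomes_inconsistentes_py detectar_sobrenomes_inconsistentes_py_alt
  rw [pvA_step, pvAlt_eq_scan, pvScan_none]
  simp only [pvFoldlApp, List.nil_append]
  set vs := (coletor.lookup "variacoes").getD [] with hvs
  set sob := vs.filterMap pvSurLow with hsob
  have hletters : vs.filterMap pvLetterOf = sob.filterMap (fun s => s.toList.head?) := by
    rw [hsob, List.filterMap_filterMap]
    exact List.filterMap_congr (fun v _ => pvLetterOf_eq v)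
  rw [hletters]
  set letters := sob.filterMap (fun s => s.toList.head?) with hlet
  simp only [PySem.Set.len]
  by_cases hOuter : ((PySem.Set.ofList sob).length : Int) > 1
  · rw [if_pos hOuter]
    by_cases hAll : ∀ a ∈ letters, ∀ b ∈ letters, a = b
    · have hle := (pvSetLenLeOne letters).mpr hAll
      have hnot : ¬ ((PySem.Set.ofList letters).length : Int) > 1 := by
        omega
      simpa [hnot] using hAll
    · have hgt : ((PySem.Set.ofList letters).length : Int) > 1 := by
        have : ¬ (PySem.Set.ofList letters).length ≤ 1 :=
          fun h => hAll ((pvSetLenLeOne letters).mp h)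
        omega
      simp [hgt, hAll]
  · rw [if_neg hOuter]
    have hall : ∀ a ∈ sob, ∀ b ∈ sob, a = b := (pvSetLenLeOne sob).mp (by omega)
    have hAll : ∀ a ∈ letters, ∀ b ∈ letters, a = b := by
      rw [hlet]
      intro a ha b hb
      rw [List.mem_filterMap] at ha hb
      obtain ⟨s, hs, hsa⟩ := ha
      obtain ⟨t, ht, htb⟩ := hb
      rw [hall s hs t ht, htb] at hsa
      exact (Option.some_injective _ hsa).symm
    simpa using hAll

-- ===== VERDICT (by name: the statement is the Claim_ definition above) =====
theorem detectar_sobrenomes_inconsistentes_py_spec : Claim_equal_detectar_sobrenomes_inconsistentes_py := by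
  intro coletor _ _
  unfold Spec_detectar_sobrenomes_inconsistentes_py
  exact detectar_equal coletor
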